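-- pv_equiv track=rewrite | github.com/Rodro1975/ing-rrhh-tech-level-3 | colisiones/colisiones.py | f
-- ===== SOURCE A (Python) =====
-- def f(sequence: str) -> str:
--     n = len(sequence)
--     collisions = [0] * n
--     robots = list(sequence)
--
--     # Simulate movements and collisions
--     while True:
--         changes = False
--         new_robots = robots.copy()
--
--         # Detect collisions and change directions
--         for i in range(n - 1):
--             if robots[i] == 'R' and robots[i + 1] == 'L':
--                 collisions[i] += 1
--                 collisions[i + 1] += 1
--                 new_robots[i], new_robots[i + 1] = 'L', 'R'  # Cambiar direcciones
--                 changes = True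
--
--         robots = new_robots
--
--         # If there are no more changes, break the cycle
--         if not changes:
--             break
--
--     return ' '.join(map(str, collisions))
-- ===== SOURCE B (Python) =====
-- def f(sequence: str) -> str:
--     # Closed-form: total swaps across boundary b = min(#R in the R/L-run ending at b,
--     # #L in the R/L-run starting at b+1); collisions[i] = swaps at boundary i-1 + swaps at boundary i.
--     if not sequence:
--         return ''
--     n = len(sequence)
--     rleft = []
--     cnt = 0
--     for c in sequence:
--         cnt = cnt + 1 if c == 'R' else (cnt if c == 'L' else 0)
--         rleft.append(cnt)
--     lright = [0] * n
--     cnt = 0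
--     for i in range(n - 1, -1, -1):
--         c = sequence[i]
--         cnt = cnt + 1 if c == 'L' else (cnt if c == 'R' else 0)
--         lright[i] = cnt
--     S = [min(a, b) for a, b in zip(rleft, lright[1:])]
--     return ' '.join(str(a + b) for a, b in zip([0] + S, S + [0]))
-- ===== Notes on version B (the rewrite author's own statement) =====
-- stated objective: alternative
-- what changed: Replaces the round-by-round collision simulation (repeated full passes until no R,L pair remains) by a closed form: total swaps across each boundary b equal min(#R in the R/L-run ending at b, #L in the R/L-run starting at b+1), computed with one left and one right scan; each position's count is the sum of its two adjacent boundary totals.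
import Mathlib
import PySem

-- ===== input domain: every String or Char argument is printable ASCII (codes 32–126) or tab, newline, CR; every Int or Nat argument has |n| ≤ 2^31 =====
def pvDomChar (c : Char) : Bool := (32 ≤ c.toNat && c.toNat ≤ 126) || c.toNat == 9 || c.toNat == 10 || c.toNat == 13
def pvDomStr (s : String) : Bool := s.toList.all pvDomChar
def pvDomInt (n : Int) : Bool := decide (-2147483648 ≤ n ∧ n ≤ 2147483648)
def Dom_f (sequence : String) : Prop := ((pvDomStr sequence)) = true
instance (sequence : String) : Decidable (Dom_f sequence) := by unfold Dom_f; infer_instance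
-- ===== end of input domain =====

-- B is the same collision count computed in closed form (two linear scans) instead of A's
-- round-by-round simulation; proved equal on every input.

-- ===== PORT A =====
-- One round of A's `for i in range(n-1)` pass: conditions are read from the OLD `robots`
-- array while swaps go into `new_robots`; since a swap at i forces old robots[i+1] = 'L',
-- the condition at i+1 never fires, so the simultaneous pass is exactly this left-to-right
-- rewrite consuming a swapped pair whole.  State = (new_robots, collisions, changes).
def roundA : List Char → List Int → List Char × List Int × Bool
  | 'R' :: 'L' :: rs, c1 :: c2 :: cs =>
      match roundA rs cs with
      | (rs', cs', _) => ('L' :: 'R' :: rs', (c1 + 1) :: (c2 + 1) :: cs', true)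
  | c :: rs, x :: cs =>
      match roundA rs cs with
      | (rs', cs', ch) => (c :: rs', x :: cs', ch)
  | rs, cs => (rs, cs, false)

-- Termination measure for A's `while True` loop: total distance the 'R's can still travel.
def phiA : List Char → Nat
  | [] => 0
  | c :: cs => (if c = 'R' then cs.length + 1 else 0) + phiA cs

theorem roundA_len (rs : List Char) (cs : List Int) : (roundA rs cs).1.length = rs.length := by
  fun_induction roundA rs cs <;> simp_all

theorem roundA_phi (rs : List Char) (cs : List Int) :
    phiA (roundA rs cs).1 ≤ phiA rs ∧ ((roundA rs cs).2.2 = true → phiA (roundA rs cs).1 < phiA rs) := by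
  fun_induction roundA rs cs with
  | case1 rs c1 c2 cs rs' cs' b heq ih =>
      have hl := roundA_len rs cs
      rw [heq] at ih hl
      simp only [phiA] at *
      obtain ⟨ih1, -⟩ := ih
      simp at hl ⊢
      omega
  | case2 c rs x cs _ rs' cs' ch heq ih =>
      have hl := roundA_len rs cs
      rw [heq] at ih hl
      simp only [phiA] at *
      obtain ⟨ih1, ih2⟩ := ih
      refine ⟨by split_ifs <;> omega, fun hch => ?_⟩
      have := ih2 hch
      split_ifs <;> omega
  | case3 rs cs h1 h2 => simp

theorem roundA_phi_lt (rs : List Char) (cs : List Int) (h : (roundA rs cs).2.2 = true) :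
    phiA (roundA rs cs).1 < phiA rs := (roundA_phi rs cs).2 h

-- A's `while True: … if not changes: break` loop.
def loopA (robots : List Char) (collisions : List Int) : List Int :=
  let r := roundA robots collisions
  if h : r.2.2 = true then loopA r.1 r.2.1 else r.2.1
termination_by phiA robots
decreasing_by exact roundA_phi_lt robots collisions h

def f (sequence : String) : String :=
  let robots := sequence.toList
  let collisions := List.replicate robots.length (0 : Int)
  PySem.Str.join " " ((loopA robots collisions).map PySem.Int.toStr)

-- ===== PORT B =====
-- first loop of Source B: rleft[i] = number of 'R' in the maximal R/L-run ending at i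
def rlL (cnt : Int) : List Char → List Int
  | [] => []
  | c :: cs =>
      let cnt' := if c = 'R' then cnt + 1 else if c = 'L' then cnt else 0
      cnt' :: rlL cnt' cs

-- second loop of Source B (runs right-to-left, filling lright back to front):
-- lright[i] = number of 'L' in the maximal R/L-run starting at i
def lrL : List Char → List Int
  | [] => []
  | c :: cs =>
      let rest := lrL cs
      (if c = 'L' then rest.headD 0 + 1 else if c = 'R' then rest.headD 0 else 0) :: rest

def f_alt (sequence : String) : String :=
  let s := sequence.toList
  if s.isEmpty then "" else
    let S := List.zipWith min (rlL 0 s) (lrL s).tail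
    PySem.Str.join " "
      (List.zipWith (fun a b => PySem.Int.toStr (a + b)) ((0 : Int) :: S) (S ++ [(0 : Int)]))

-- ===== PRECONDITION & SPEC =====
def Spec_f (sequence : String) (out : String) : Prop := out = f_alt sequence
instance (sequence : String) (out : String) : Decidable (Spec_f sequence out) := by unfold Spec_f; infer_instance

-- ===== CLAIM (what is proved, stated in full; the proofs are below) =====
def Claim_equal_f : Prop := ∀ (sequence : String), Dom_f sequence → Spec_f sequence (f sequence)

-- ===== LEMMAS AND PROOFS =====

-- proof-side views of one round of A
def stepR : List Char → List Char
  | 'R' :: 'L' :: rs => 'L' :: 'R' :: stepR rs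
  | c :: rs => c :: stepR rs
  | [] => []

def hasRL : List Char → Bool
  | 'R' :: 'L' :: _ => true
  | _ :: rs => hasRL rs
  | [] => false

def posInd : List Char → List Int
  | 'R' :: 'L' :: rs => 1 :: 1 :: posInd rs
  | _ :: rs => 0 :: posInd rs
  | [] => []

def ivR : List Char → List Int
  | 'R' :: 'L' :: rs => 1 :: 0 :: ivR rs
  | _ :: rs => 0 :: ivR rs
  | [] => []

def ivL : List Char → List Int
  | 'R' :: 'L' :: rs => 0 :: 1 :: ivL rs
  | _ :: rs => 0 :: ivL rs
  | [] => []

def svec (s : List Char) : List Int := List.zipWith min (rlL 0 s) (lrL s).tail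

def posOf (sv : List Int) : List Int := List.zipWith (· + ·) ((0 : Int) :: sv) (sv ++ [(0 : Int)])

def posvecOf (s : List Char) : List Int := if s = [] then [] else posOf (svec s)

@[simp] theorem len_rlL (cnt : Int) (s : List Char) : (rlL cnt s).length = s.length := by
  fun_induction rlL cnt s <;> simp_all

@[simp] theorem len_lrL (s : List Char) : (lrL s).length = s.length := by
  induction s with
  | nil => simp [lrL]
  | cons c cs ih => simp [lrL, ih]

@[simp] theorem len_ivR (s : List Char) : (ivR s).length = s.length := by
  fun_induction ivR s <;> simp_all

@[simp] theorem len_ivL (s : List Char) : (ivL s).length = s.length := by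
  fun_induction ivL s <;> simp_all

@[simp] theorem len_posInd (s : List Char) : (posInd s).length = s.length := by
  fun_induction posInd s <;> simp_all

@[simp] theorem len_stepR (s : List Char) : (stepR s).length = s.length := by
  fun_induction stepR s <;> simp_all

theorem stepR_cons (c : Char) (rs : List Char) (h : ¬(c = 'R' ∧ rs.head? = some 'L')) :
    stepR (c :: rs) = c :: stepR rs := by
  rw [stepR.eq_def]; split <;> simp_all

theorem hasRL_cons (c : Char) (rs : List Char) (h : ¬(c = 'R' ∧ rs.head? = some 'L')) :
    hasRL (c :: rs) = hasRL rs := by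
  rw [hasRL.eq_def]; split <;> simp_all

theorem posInd_cons (c : Char) (rs : List Char) (h : ¬(c = 'R' ∧ rs.head? = some 'L')) :
    posInd (c :: rs) = 0 :: posInd rs := by
  rw [posInd.eq_def]; split <;> simp_all

theorem ivR_cons (c : Char) (rs : List Char) (h : ¬(c = 'R' ∧ rs.head? = some 'L')) :
    ivR (c :: rs) = 0 :: ivR rs := by
  rw [ivR.eq_def]; split <;> simp_all

theorem ivL_cons (c : Char) (rs : List Char) (h : ¬(c = 'R' ∧ rs.head? = some 'L')) :
    ivL (c :: rs) = 0 :: ivL rs := by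
  rw [ivL.eq_def]; split <;> simp_all

theorem roundA_spec (rs : List Char) (cs : List Int) (h : cs.length = rs.length) :
    roundA rs cs = (stepR rs, List.zipWith (· + ·) cs (posInd rs), hasRL rs) := by
  fun_induction roundA rs cs with
  | case1 rs c1 c2 cs rs' cs' b heq ih =>
      have h2 := (ih (by simpa using h)).symm.trans heq
      simp only [Prod.mk.injEq] at h2
      obtain ⟨e1, e2, e3⟩ := h2
      subst e1; subst e2
      simp [stepR, posInd, hasRL]
  | case2 c rs x cs hg rs' cs' ch heq ih =>
      have hne : ¬(c = 'R' ∧ rs.head? = some 'L') := by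
        rintro ⟨hc, hh⟩
        rcases rs with _ | ⟨r, rs0⟩ <;> simp at hh
        subst hh
        rcases cs with _ | ⟨c2, cs0⟩
        · simp at h
        · exact hg rs0 c2 cs0 hc rfl rfl
      have h2 := (ih (by simpa using h)).symm.trans heq
      simp only [Prod.mk.injEq] at h2
      obtain ⟨e1, e2, e3⟩ := h2
      subst e1; subst e2
      simp [stepR_cons c rs hne, posInd_cons c rs hne, hasRL_cons c rs hne, e3]
  | case3 rs cs h1 h2 =>
      rcases rs with _ | ⟨c, rs0⟩
      · have : cs = [] := by simpa using h
        subst this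
        simp [stepR, posInd, hasRL]
      · rcases cs with _ | ⟨x, cs0⟩
        · simp at h
        · exact absurd rfl (fun hh => h2 c rs0 x cs0 hh rfl)

theorem guard_to_hne {c : Char} {rs : List Char}
    (hg : ∀ rs', c = 'R' → rs = 'L' :: rs' → False) : ¬(c = 'R' ∧ rs.head? = some 'L') := by
  rintro ⟨hc, hh⟩
  rcases rs with _ | ⟨r, rs0⟩ <;> simp at hh
  subst hh
  exact hg rs0 hc rfl

theorem ivL_head_shape (c : Char) (rs : List Char) : ∃ t, ivL (c :: rs) = 0 :: t := by
  rw [ivL.eq_def]; split <;> simp_all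

theorem sub_ivL_headD (r : List Char) :
    (List.zipWith (· - ·) (lrL r) (ivL r)).head?.getD 0 = (lrL r).head?.getD 0 := by
  rcases r with _ | ⟨c, rs⟩
  · simp [lrL, ivL]
  · obtain ⟨t, ht⟩ := ivL_head_shape c rs
    rw [ht]
    simp [lrL]

theorem rlL_stepR (s : List Char) (cnt : Int) :
    rlL cnt (stepR s) = List.zipWith (· - ·) (rlL cnt s) (ivR s) := by
  fun_induction stepR s generalizing cnt with
  | case1 rs ih =>
      simp [rlL, ivR, ih (cnt + 1)]
  | case2 c rs hg ih =>
      have hne := guard_to_hne hg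
      rw [ivR_cons c rs hne]
      simp only [rlL]
      split_ifs <;> simp [ih]
  | case3 => simp [rlL, ivR]

theorem lrL_stepR (s : List Char) :
    lrL (stepR s) = List.zipWith (· - ·) (lrL s) (ivL s) := by
  fun_induction stepR s with
  | case1 rs ih =>
      simp [lrL, ivL, ih, sub_ivL_headD]
  | case2 c rs hg ih =>
      have hne := guard_to_hne hg
      rw [ivL_cons c rs hne]
      have hh := sub_ivL_headD rs
      simp only [lrL, ih]
      split_ifs <;> simp [hh]
  | case3 => simp [lrL, ivL]

theorem ivL_eq (s : List Char) (h : s ≠ []) : ivL s = 0 :: (ivR s).dropLast := by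
  fun_induction ivL s with
  | case1 rs ih =>
      rcases Decidable.em (rs = []) with h0 | h0
      · subst h0; simp [ivR, ivL]
      · have hne : ivR rs ≠ [] := by
          intro hh; apply h0
          have := congrArg List.length hh; simpa using this
        simp [ivR, ih h0, List.dropLast_cons_of_ne_nil hne]
  | case2 c rs hg ih =>
      have hne := guard_to_hne hg
      rw [ivR_cons c rs hne]
      rcases Decidable.em (rs = []) with h0 | h0
      · subst h0; simp [ivR, ivL]
      · have hne2 : ivR rs ≠ [] := by
          intro hh; apply h0
          have := congrArg List.length hh; simpa using this
        simp [ih h0, List.dropLast_cons_of_ne_nil hne2]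
  | case3 => simp at h

theorem ivR_last (s : List Char) : ivR s = (ivR s).dropLast ++ [0] ∨ s = [] := by
  fun_induction ivR s with
  | case1 rs ih =>
      left
      rcases ih with ih | ih
      · rw [ih]
        rcases hd : (ivR rs).dropLast with _ | ⟨y, t⟩ <;> simp_all
      · subst ih; simp [ivR]
  | case2 c rs hg ih =>
      left
      rcases ih with ih | ih
      · rw [ih]
        rcases hd : (ivR rs).dropLast with _ | ⟨y, t⟩ <;> simp_all
      · subst ih; simp [ivR]
  | case3 => right; rfl

theorem ivR_le_rlL (s : List Char) (cnt : Int) (h : 0 ≤ cnt) :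
    List.Forall₂ (· ≤ ·) (ivR s) (rlL cnt s) := by
  fun_induction ivR s generalizing cnt with
  | case1 rs ih =>
      simp only [rlL, List.forall₂_cons]
      norm_num
      refine ⟨by omega, by omega, ih (cnt + 1) (by omega)⟩
  | case2 c rs hg ih =>
      simp only [rlL, List.forall₂_cons]
      constructor
      · split_ifs <;> omega
      · apply ih; split_ifs <;> omega
  | case3 => simp [rlL]

theorem lrL_nonneg (s : List Char) : ∀ x ∈ lrL s, 0 ≤ x := by
  induction s with
  | nil => simp [lrL]
  | cons c cs ih =>
      have hh : 0 ≤ (lrL cs).head?.getD 0 := by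
        rcases hl : lrL cs with _ | ⟨y, t⟩
        · simp
        · simpa using ih y (by rw [hl]; exact List.mem_cons_self)
      intro x hx
      simp only [lrL, List.mem_cons] at hx
      rcases hx with hx | hx
      · subst hx; simp only [List.headD_eq_head?_getD]; split_ifs <;> omega
      · exact ih x hx

theorem ivL_le_lrL (s : List Char) : List.Forall₂ (· ≤ ·) (ivL s) (lrL s) := by
  fun_induction ivL s with
  | case1 rs ih =>
      have hh : 0 ≤ (lrL rs).head?.getD 0 := by
        rcases hl : lrL rs with _ | ⟨y, t⟩
        · simp
        · simpa using lrL_nonneg rs y (by rw [hl]; exact List.mem_cons_self)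
      simp only [lrL, List.forall₂_cons]
      norm_num
      refine ⟨by omega, by omega, ih⟩
  | case2 c rs hg ih =>
      have hh : 0 ≤ (lrL rs).head?.getD 0 := by
        rcases hl : lrL rs with _ | ⟨y, t⟩
        · simp
        · simpa using lrL_nonneg rs y (by rw [hl]; exact List.mem_cons_self)
      simp only [lrL, List.forall₂_cons, List.headD_eq_head?_getD]
      refine ⟨by split_ifs <;> omega, ih⟩
  | case3 => simp [lrL]

theorem posInd_eq (s : List Char) : posInd s = List.zipWith (· + ·) (ivR s) (ivL s) := by
  fun_induction posInd s with
  | case1 rs ih => simp [ivR, ivL, ih]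
  | case2 c rs hg ih =>
      have hne := guard_to_hne hg
      rw [ivR_cons c rs hne, ivL_cons c rs hne]
      simp [ih]
  | case3 => simp [ivR, ivL]

theorem posInd_zero (s : List Char) (h : hasRL s = false) :
    posInd s = List.replicate s.length 0 := by
  fun_induction posInd s with
  | case1 rs ih => simp [hasRL] at h
  | case2 c rs hg ih =>
      have hne := guard_to_hne hg
      rw [hasRL_cons c rs hne] at h
      simp [List.replicate_succ, ih h]
  | case3 => simp

theorem noRL_lrL_head (t : List Char) (h : hasRL t = false) (h2 : t.head? ≠ some 'L') :
    (lrL t).head?.getD 0 = 0 := by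
  induction t with
  | nil => simp [lrL]
  | cons c rs ih =>
      have hc : c ≠ 'L' := by simpa using h2
      have hne : ¬(c = 'R' ∧ rs.head? = some 'L') := by
        rintro ⟨hcr, hh⟩
        rcases rs with _ | ⟨r, rs0⟩ <;> simp at hh
        subst hcr; subst hh
        simp [hasRL] at h
      rw [hasRL_cons c rs hne] at h
      simp only [lrL, List.head?_cons, Option.getD_some]
      rcases Decidable.em (c = 'R') with hr | hr
      · have hrh : rs.head? ≠ some 'L' := fun hh => hne ⟨hr, hh⟩
        simp [hr, ih h hrh]
      · simp [hc, hr]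

theorem svec_zero_aux (s : List Char) (cnt : Int) (h : hasRL s = false) (h0 : 0 ≤ cnt)
    (h2 : 0 < cnt → s.head? ≠ some 'L') :
    List.zipWith min (rlL cnt s) ((lrL s).tail) = List.replicate (s.length - 1) 0 := by
  induction s generalizing cnt with
  | nil => simp [rlL, lrL]
  | cons c1 rest ih =>
      rcases rest with _ | ⟨c2, r2⟩
      · simp [rlL, lrL]
      · have hne : ¬(c1 = 'R' ∧ (c2 :: r2).head? = some 'L') := by
          rintro ⟨hcr, hh⟩
          simp at hh
          subst hcr; subst hh
          simp [hasRL] at h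
        have hc2 : c1 = 'R' → c2 ≠ 'L' := fun hr hl => hne ⟨hr, by simp [hl]⟩
        have h' : hasRL (c2 :: r2) = false := by rw [hasRL_cons c1 _ hne] at h; exact h
        set cnt1 : Int := if c1 = 'R' then cnt + 1 else if c1 = 'L' then cnt else 0 with hcnt1
        have h01 : 0 ≤ cnt1 := by rw [hcnt1]; split_ifs <;> omega
        have hrec := ih (cnt := cnt1) h' h01 (by
          intro hpos
          rw [hcnt1] at hpos
          split_ifs at hpos with hA hB
          · simpa using hc2 hA
          · exact absurd hB (by simpa using h2 (by omega))
          · omega)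
        have hv2 : 0 ≤ (lrL (c2 :: r2)).head?.getD 0 := by
          rcases hl : lrL (c2 :: r2) with _ | ⟨y, t⟩
          · simp
          · simpa using lrL_nonneg _ y (by rw [hl]; exact List.mem_cons_self)
        have hmin : min cnt1 ((lrL (c2 :: r2)).head?.getD 0) = 0 := by
          rcases Decidable.em (c1 = 'R') with hr | hr
          · have := noRL_lrL_head (c2 :: r2) h' (by simpa using hc2 hr)
            rw [this]
            have : 0 ≤ cnt1 := h01
            omega
          · have hz : cnt1 = 0 := by
              rw [hcnt1]
              split_ifs with hA
              · by_contra hz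
                exact absurd hA (by simpa using h2 (by omega))
              · rfl
            omega
        rcases hl : lrL (c2 :: r2) with _ | ⟨y, t⟩
        · exact absurd (congrArg List.length hl) (by simp)
        · have hy : (lrL (c2 :: r2)).head?.getD 0 = y := by rw [hl]; rfl
          rw [hy] at hmin
          have e1 : rlL cnt (c1 :: c2 :: r2) = cnt1 :: rlL cnt1 (c2 :: r2) := rfl
          have et : (lrL (c1 :: c2 :: r2)).tail = lrL (c2 :: r2) := rfl
          rw [hl] at hrec
          simp only [List.tail_cons] at hrec
          rw [e1, et, hl]
          simp only [List.zipWith_cons_cons]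
          rw [hmin, hrec]
          simp [List.replicate_succ]

theorem svec_stepR (s : List Char) (h : s ≠ []) :
    svec s = List.zipWith (· + ·) ((ivL s).tail) (svec (stepR s)) := by
  have hlen : 0 < s.length := List.length_pos_iff.mpr h
  have hFa := (List.forall₂_iff_get.mp (ivR_le_rlL s 0 (by omega))).2
  have hFb := (List.forall₂_iff_get.mp (ivL_le_lrL s)).2
  apply List.ext_getElem
  · simp [svec]
  · intro b hb1 hb2
    have hb : b < s.length - 1 := by simpa [svec] using hb1
    have hbs : b + 1 < s.length := by omega
    simp only [svec, rlL_stepR s 0, lrL_stepR s, List.getElem_zipWith, List.getElem_tail]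
    have hivL : ivL s = 0 :: (ivR s).dropLast := ivL_eq s h
    have e1 : (ivL s)[b + 1]'(by simpa using hbs) = (ivR s)[b]'(by simp; omega) := by
      simp only [hivL, List.getElem_cons_succ, List.getElem_dropLast]
    rw [e1]
    have t1 := hFa b (by simp; omega) (by simp; omega)
    have t2 := hFb (b + 1) (by simpa using hbs) (by simpa using hbs)
    simp only [List.get_eq_getElem] at t1 t2
    rw [e1] at t2
    omega

theorem zipWith_add_replicate_left (cs : List Int) :
    List.zipWith (· + ·) (List.replicate cs.length 0) cs = cs := by
  induction cs with
  | nil => rfl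
  | cons x xs ih => simp [List.replicate_succ, ih]

theorem getElem_posOf (sv : List Int) (i : Nat) (hi : i < (posOf sv).length) :
    (posOf sv)[i] = (if 0 < i then sv.getD (i - 1) 0 else 0) + sv.getD i 0 := by
  have hlen : i < sv.length + 1 := by simp [posOf] at hi; omega
  simp only [posOf, List.getElem_zipWith]
  congr 1
  · rcases i with _ | k
    · simp
    · rw [List.getElem_cons_succ, if_pos (by omega)]
      simp only [Nat.add_sub_cancel]
      exact (List.getD_eq_getElem sv 0 (by omega)).symm
  · by_cases hl : i < sv.length
    · rw [List.getElem_append_left hl]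
      exact (List.getD_eq_getElem sv 0 hl).symm
    · have hle : i = sv.length := by omega
      subst hle
      simp

theorem posOf_step (s : List Char) (h : s ≠ []) :
    List.zipWith (· + ·) (posInd s) (posOf (svec (stepR s))) = posOf (svec s) := by
  have hlen : 0 < s.length := List.length_pos_iff.mpr h
  have hlsv : (svec s).length = s.length - 1 := by simp [svec]
  have hlsv' : (svec (stepR s)).length = s.length - 1 := by simp [svec]
  have hivL : ivL s = 0 :: (ivR s).dropLast := ivL_eq s h
  have hlast : ivR s = (ivR s).dropLast ++ [0] := (ivR_last s).resolve_right h
  have hsv := svec_stepR s h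
  have pAlast : (ivR s).getD (s.length - 1) 0 = 0 := by
    conv_lhs => rw [hlast]
    rw [List.getD_eq_getElem?_getD, List.getElem?_append_right (by simp)]
    simp
  have pL0 : (ivL s).getD 0 0 = 0 := by simp [hivL]
  have pL : ∀ (k : Nat), (ivL s).getD (k + 1) 0 = (ivR s).getD k 0 := by
    intro k
    rw [hivL, List.getD_cons_succ]
    by_cases hk : k < s.length - 1
    · rw [List.getD_eq_getElem _ _ (by simp; omega), List.getD_eq_getElem _ _ (by simp; omega),
        List.getElem_dropLast]
    · by_cases hk2 : k = s.length - 1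
      · subst hk2
        rw [List.getD_eq_default _ _ (by simp)]
        exact pAlast.symm
      · rw [List.getD_eq_default _ _ (by simp; omega), List.getD_eq_default _ _ (by simp; omega)]
  have psv : ∀ (b : Nat),
      (svec s).getD b 0 = (ivL s).getD (b + 1) 0 + (svec (stepR s)).getD b 0 := by
    intro b
    by_cases hb : b < s.length - 1
    · rw [List.getD_eq_getElem _ _ (by omega), List.getD_eq_getElem _ _ (by simp; omega),
        List.getD_eq_getElem _ _ (by omega)]
      rw [List.getElem_of_eq hsv, List.getElem_zipWith]
      congr 1
      apply List.getElem_tail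
    · rw [List.getD_eq_default _ _ (by omega), List.getD_eq_default _ _ (by simp; omega),
        List.getD_eq_default _ _ (by omega)]
      simp
  have conv1 : ∀ (l : List Int) (k : Nat) (hk : k < l.length), l[k] = l.getD k 0 :=
    fun l k hk => (List.getD_eq_getElem l 0 hk).symm
  apply List.ext_getElem
  · simp [posOf, hlsv, hlsv']
    omega
  · intro i hi1 hi2
    rw [List.getElem_zipWith, getElem_posOf _ _ (by simp [posOf] at hi1 ⊢; omega),
      getElem_posOf _ _ hi2]
    simp only [posInd_eq, List.getElem_zipWith]
    simp only [conv1]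
    by_cases h0 : 0 < i
    · obtain ⟨k, rfl⟩ : ∃ k, i = k + 1 := ⟨i - 1, by omega⟩
      rw [if_pos h0, if_pos h0]
      have e1 := pL k
      have e2 := psv k
      have e3 := psv (k + 1)
      have e4 := pL (k + 1)
      simp only [Nat.add_sub_cancel] at *
      omega
    · have hz : i = 0 := by omega
      subst hz
      rw [if_neg h0, if_neg h0]
      have e1 := pL 0
      have e2 := psv 0
      omega

theorem zipWith_add_assoc (as bs cs : List Int) :
    List.zipWith (· + ·) (List.zipWith (· + ·) as bs) cs =
      List.zipWith (· + ·) as (List.zipWith (· + ·) bs cs) := by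
  induction as generalizing bs cs with
  | nil => simp
  | cons a as ih =>
      rcases bs with _ | ⟨b, bs⟩
      · simp
      · rcases cs with _ | ⟨c, cs⟩
        · simp
        · simp [ih, Int.add_assoc]

theorem posOf_replicate (m : Nat) :
    posOf (List.replicate m (0 : Int)) = List.replicate (m + 1) 0 := by
  have h1 : (0 : Int) :: List.replicate m (0 : Int) = List.replicate (m + 1) 0 := by
    simp [List.replicate_succ]
  have h2 : List.replicate m (0 : Int) ++ [0] = List.replicate (m + 1) 0 := by
    simp [List.replicate_succ']
  rw [posOf, h1, h2, List.zipWith_replicate]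
  simp

theorem loopA_eq (s : List Char) (cs : List Int) (h : cs.length = s.length) :
    loopA s cs = List.zipWith (· + ·) cs (posvecOf s) := by
  rw [loopA]
  simp only [roundA_spec s cs h]
  by_cases hRL : hasRL s = true
  · rw [dif_pos hRL]
    have hne : s ≠ [] := by rintro rfl; simp [hasRL] at hRL
    have hlen' : (List.zipWith (· + ·) cs (posInd s)).length = (stepR s).length := by
      simp [h]
    have IH := loopA_eq (stepR s) (List.zipWith (· + ·) cs (posInd s)) hlen'
    rw [IH]
    have hne' : stepR s ≠ [] := by
      intro hh
      have := congrArg List.length hh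
      simp at this
      exact hne this
    rw [posvecOf, if_neg hne', posvecOf, if_neg hne]
    rw [← posOf_step s hne]
    exact zipWith_add_assoc cs (posInd s) (posOf (svec (stepR s)))
  · rw [dif_neg hRL]
    have hRL' : hasRL s = false := by simpa using hRL
    rcases Decidable.em (s = []) with hs | hs
    · subst hs
      have : cs = [] := by simpa using h
      subst this
      rfl
    · have hlen : 0 < s.length := List.length_pos_iff.mpr hs
      rw [posInd_zero s hRL', posvecOf, if_neg hs]
      have hz : svec s = List.replicate (s.length - 1) 0 :=
        svec_zero_aux s 0 hRL' (by omega) (by omega)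
      rw [hz, posOf_replicate]
      have : s.length - 1 + 1 = s.length := by omega
      rw [this]
termination_by phiA s
decreasing_by
  have h1 := roundA_phi_lt s cs (by rw [roundA_spec s cs h]; exact hRL)
  rw [roundA_spec s cs h] at h1
  exact h1

-- ===== VERDICT (by name: the statement is the Claim_ definition above) =====
theorem map_toStr_posOf (sv : List Int) :
    (posOf sv).map PySem.Int.toStr =
      List.zipWith (fun a b => PySem.Int.toStr (a + b)) ((0 : Int) :: sv) (sv ++ [(0 : Int)]) := by
  rw [posOf, List.map_zipWith]

theorem f_spec : Claim_equal_f := by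
  unfold Claim_equal_f
  intro seq _
  unfold Spec_f f f_alt
  dsimp only
  rw [loopA_eq _ _ (by simp)]
  rcases Decidable.em (seq.toList = []) with hs | hs
  · rw [hs]
    simp only [posvecOf]
    rfl
  · have hlen : 0 < seq.toList.length := List.length_pos_iff.mpr hs
    have hrep : seq.toList.length = (posvecOf seq.toList).length := by
      rw [posvecOf, if_neg hs]
      simp only [posOf, List.length_zipWith, List.length_cons, List.length_append,
        List.length_cons, List.length_nil, svec, len_rlL, len_lrL, List.length_tail]
      omega
    rw [hrep, zipWith_add_replicate_left]
    rw [if_neg (by simpa [List.isEmpty_iff] using hs)]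
    rw [posvecOf, if_neg hs, map_toStr_posOf]
    rfl
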